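-- pv_equiv track=rewrite | github.com/HalloWelt42/RadioHub | radiohub-backend/backend/services/hls_buffer.py | snap_to_step
-- ===== SOURCE A (Python) =====
-- STANDARD_BITRATES = [32, 48, 64, 96, 128, 192, 256, 320]
--
-- def snap_to_step(bitrate: int) -> int:
--     """Rundet auf die naechste Standard-Bitrate ab (nicht hoeher als Input)."""
--     best = STANDARD_BITRATES[0]
--     for step in STANDARD_BITRATES:
--         if step <= bitrate:
--             best = step
--         else:
--             break
--     return best
-- ===== SOURCE B (Python) =====
-- import bisect
--
-- STANDARD_BITRATES = [32, 48, 64, 96, 128, 192, 256, 320]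
--
-- def snap_to_step(bitrate: int) -> int:
--     """Rundet auf die naechste Standard-Bitrate ab (nicht hoeher als Input)."""
--     i = bisect.bisect_right(STANDARD_BITRATES, bitrate)
--     if i == 0:
--         return STANDARD_BITRATES[0]
--     return STANDARD_BITRATES[i - 1]
-- ===== Notes on version B (the rewrite author's own statement) =====
-- stated objective: idiomatic
-- what changed: Replaced the linear scan with early break by a bisect.bisect_right binary search on the sorted constant list, returning the element left of the insertion point (or the minimum 32 when the insertion point is 0).
import Mathlib
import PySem

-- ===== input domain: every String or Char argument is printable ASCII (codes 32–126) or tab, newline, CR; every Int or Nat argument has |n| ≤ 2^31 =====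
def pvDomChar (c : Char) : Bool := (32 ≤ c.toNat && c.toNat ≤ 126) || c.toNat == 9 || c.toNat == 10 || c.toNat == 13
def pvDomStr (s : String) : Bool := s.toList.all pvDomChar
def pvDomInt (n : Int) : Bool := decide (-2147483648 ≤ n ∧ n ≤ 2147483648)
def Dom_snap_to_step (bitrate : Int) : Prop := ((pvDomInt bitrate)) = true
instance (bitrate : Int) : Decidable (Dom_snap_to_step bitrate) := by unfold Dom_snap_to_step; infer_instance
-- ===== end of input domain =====

-- B replaces A's linear scan (with early break) by a bisect_right binary search; same result, idiomatic.

-- ===== PORT A =====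
def STANDARD_BITRATES : List Int := [32, 48, 64, 96, 128, 192, 256, 320]

-- A's for-loop with break, as structural recursion carrying `best`
def snapLoopA : List Int → Int → Int → Int
  | [], _, best => best
  | step :: rest, bitrate, best =>
      if step ≤ bitrate then snapLoopA rest bitrate step else best

def snap_to_step (bitrate : Int) : Int :=
  snapLoopA STANDARD_BITRATES bitrate (STANDARD_BITRATES.getD 0 0)

-- ===== PORT B =====
-- bisect.bisect_right over a sorted list, ported as the standard lo/hi binary search
def bisectRight (xs : List Int) (x : Int) (lo hi : Nat) : Nat :=
  if h : lo < hi then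
    let mid := (lo + hi) / 2
    if x < xs.getD mid 0 then bisectRight xs x lo mid
    else bisectRight xs x (mid + 1) hi
  else lo
termination_by hi - lo
decreasing_by all_goals omega

def snap_to_step_alt (bitrate : Int) : Int :=
  let i := bisectRight STANDARD_BITRATES bitrate 0 STANDARD_BITRATES.length
  if i = 0 then STANDARD_BITRATES.getD 0 0
  else STANDARD_BITRATES.getD (i - 1) 0

-- ===== PRECONDITION & SPEC =====
def Spec_snap_to_step (bitrate : Int) (out : Int) : Prop := out = snap_to_step_alt bitrate
instance (bitrate : Int) (out : Int) : Decidable (Spec_snap_to_step bitrate out) := by unfold Spec_snap_to_step; infer_instance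

-- ===== CLAIM (what is proved, stated in full; the proofs are below) =====
def Claim_equal_snap_to_step : Prop := ∀ (bitrate : Int), Dom_snap_to_step bitrate → Spec_snap_to_step bitrate (snap_to_step bitrate)

-- ===== LEMMAS AND PROOFS =====

theorem snapA_char (b : Int) : snap_to_step b =
    if b < 48 then 32 else if b < 64 then 48 else if b < 96 then 64
    else if b < 128 then 96 else if b < 192 then 128 else if b < 256 then 192
    else if b < 320 then 256 else 320 := by
  simp only [snap_to_step, STANDARD_BITRATES, snapLoopA, List.getD_cons_zero]
  split_ifs <;> omega

set_option maxRecDepth 10000 in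
theorem snapB_char (b : Int) : snap_to_step_alt b =
    if b < 48 then 32 else if b < 64 then 48 else if b < 96 then 64
    else if b < 128 then 96 else if b < 192 then 128 else if b < 256 then 192
    else if b < 320 then 256 else 320 := by
  simp [snap_to_step_alt, bisectRight, STANDARD_BITRATES]
  split_ifs <;> norm_num <;> omega

-- ===== VERDICT (by name: the statement is the Claim_ definition above) =====
theorem snap_to_step_spec : Claim_equal_snap_to_step := by
  intro b _
  unfold Spec_snap_to_step
  rw [snapA_char, snapB_char]
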